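-- pv_equiv track=rewrite | github.com/jmlee0527/coding_test | programmers/문자열나누기.py | solution
-- ===== SOURCE A (Python) =====
-- def solution(s):
--     answer = 0
--     s = list(s)
--     x = s[0]
--     cnt1 = 0
--     cnt2 = 0
--     for i in range(len(s)-1):
--         if s[i] == x:
--             cnt1 += 1
--         else:
--             cnt2 += 1
--         if cnt1 == cnt2:
--             answer +=1
--             cnt1 = 0
--             cnt2 = 0
--             x = s[i+1]
--     return answer+1
-- ===== SOURCE B (Python) =====
-- def solution(s):
--     n = len(s)
--     answer = 1
--     i = 0
--     while True:
--         x = s[i]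
--         for k in range(i + 2, n):
--             if 2 * s[i:k].count(x) == k - i:
--                 answer += 1
--                 i = k
--                 break
--         else:
--             return answer
-- ===== Notes on version B (the rewrite author's own statement) =====
-- stated objective: alternative
-- what changed: Replaces A's single pass with two running per-character counters by greedy chunk-stripping: repeatedly find the next balanced cut point by testing prefix lengths with a slice-and-count, then restart after the cut; no per-character counter state is maintained.
import Mathlib
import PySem

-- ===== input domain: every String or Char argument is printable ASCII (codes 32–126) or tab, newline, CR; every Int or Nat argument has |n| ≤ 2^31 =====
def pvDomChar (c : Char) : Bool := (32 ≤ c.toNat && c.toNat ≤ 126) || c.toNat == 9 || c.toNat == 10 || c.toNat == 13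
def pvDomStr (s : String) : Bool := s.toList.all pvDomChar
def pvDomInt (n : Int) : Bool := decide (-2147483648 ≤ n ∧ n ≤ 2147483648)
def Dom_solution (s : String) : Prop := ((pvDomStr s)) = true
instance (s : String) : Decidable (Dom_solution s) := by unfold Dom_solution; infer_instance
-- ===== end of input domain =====

-- B replaces A's single pass with two running counters by greedy chunk-stripping: it repeatedly
-- finds the next balanced cut by testing prefix lengths with a slice-and-count, then restarts
-- after the cut. On the empty string A raises IndexError (excluded by Pre_solution).
-- Objective: alternative (different algorithm, not claimed faster).


-- ===== PORT A =====
-- one loop iteration of A's 'for i in range(len(s)-1)' body (l is the listed string)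
def stepA (l : List Char) (st : Int × Int × Int × Char) (i : Int) : Int × Int × Int × Char :=
  let (answer, cnt1, cnt2, x) := st
  let (cnt1, cnt2) := if PySem.List.pyGetD l i ' ' = x then (cnt1 + 1, cnt2) else (cnt1, cnt2 + 1)
  if cnt1 = cnt2 then (answer + 1, 0, 0, PySem.List.pyGetD l (i + 1) ' ')
  else (answer, cnt1, cnt2, x)

def solution (s : String) : Int :=
  let l := s.toList
  match PySem.List.pyGet? l 0 with
  | none => 0  -- x = s[0] raises IndexError on the empty string; excluded by Pre_solution
  | some x0 =>
    let st := (PySem.List.pyRange 0 ((l.length : Int) - 1) 1).foldl (stepA l) (0, 0, 0, x0)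
    st.1 + 1

-- ===== PORT B =====
-- the inner 'for k in range(i + 2, n): if 2 * s[i:k].count(x) == k - i: … break' as a find?
-- (x = s[i]; i is always in range whenever B reads it on a nonempty string)
def findCutB (l : List Char) (i : Int) : Option Int :=
  (PySem.List.pyRange (i + 2) (l.length : Int) 1).find?
    (fun k => 2 * ((PySem.List.slice l (some i) (some k)).count (PySem.List.pyGetD l i ' ') : Int) == k - i)

-- B's 'while True' loop; fuel only makes the recursion structural (i grows by ≥ 2 per round,
-- so fuel = len(s) never runs out on the admitted inputs)
def loopB (l : List Char) : Nat → Int → Int → Int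
  | 0, answer, _ => answer
  | fuel + 1, answer, i =>
    match findCutB l i with
    | none => answer
    | some k => loopB l fuel (answer + 1) k

def solution_alt (s : String) : Int :=
  loopB s.toList s.toList.length 1 0

-- ===== PRECONDITION & SPEC =====
-- A raises IndexError on the empty string (x = s[0]); that is all Pre_ excludes
-- (B also reads s[0] there and raises).
def Pre_solution (s : String) : Prop := s ≠ ""
instance (s : String) : Decidable (Pre_solution s) := by unfold Pre_solution; infer_instance
def pvWitness_solution : String := "banana"

def Spec_solution (s : String) (out : Int) : Prop := out = solution_alt s
instance (s : String) (out : Int) : Decidable (Spec_solution s out) := by unfold Spec_solution; infer_instance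

-- ===== CLAIM (what is proved, stated in full; the proofs are below) =====
def Claim_equal_solution : Prop := ∀ (s : String), Dom_solution s → Pre_solution s → Spec_solution s (solution s)

-- ===== LEMMAS AND PROOFS =====

-- A's loop as a structural recursion on the remaining suffix of the string
def loopA : Int → Int → Int → Char → List Char → Int
  | a, _, _, _, [] => a + 1
  | a, _, _, _, [_] => a + 1
  | a, c1, c2, x, c :: c' :: rest =>
      let p := if c = x then (c1 + 1, c2) else (c1, c2 + 1)
      if p.1 = p.2 then loopA (a + 1) 0 0 c' (c' :: rest)
      else loopA a p.1 p.2 x (c' :: rest)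

-- the predicate of the cut search: prefix of length c of the segment d is balanced w.r.t. x
def fcP (x : Char) (d : List Char) (c : Nat) : Bool :=
  decide (2 ≤ c ∧ 2 * (d.take c).count x = c)

-- first balanced cut length of the segment d (strictly inside d)
def fc (x : Char) (d : List Char) : Option Nat :=
  (List.range d.length).find? (fcP x d)

lemma fc_some {x : Char} {d : List Char} {c : Nat} (h : fc x d = some c) :
    2 ≤ c ∧ c < d.length ∧ 2 * (d.take c).count x = c := by
  have hp := List.find?_some h
  have hm := List.mem_of_find?_eq_some h
  simp only [fcP, decide_eq_true_eq] at hp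
  simp only [List.mem_range] at hm
  exact ⟨hp.1, hm, hp.2⟩

-- the segment-count of the remaining string
def chunk : List Char → Int
  | [] => 1
  | x :: t =>
    match h : fc x (x :: t) with
    | none => 1
    | some c => 1 + chunk ((x :: t).drop c)
  termination_by l => l.length
  decreasing_by
    have := fc_some h
    simp only [List.length_drop]
    simp only [List.length_cons] at this ⊢
    omega

-- the non-recursive body of chunk, used to state the scan invariant
def segTail (x : Char) (d : List Char) : Int :=
  match fc x d with
  | none => 1
  | some c => 1 + chunk (d.drop c)

lemma chunk_cons (x : Char) (t : List Char) : chunk (x :: t) = segTail x (x :: t) := by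
  rw [chunk, segTail]
  split <;> simp_all

-- find? over range n when the predicate fails at 0 and 1: shift by 2
lemma find?_range_shift2 {p : Nat → Bool} (n : Nat) (h0 : p 0 = false) (h1 : p 1 = false) :
    (List.range n).find? p = ((List.range (n - 2)).find? (fun j => p (j + 2))).map (fun j => j + 2) := by
  match n with
  | 0 => simp
  | 1 =>
    have : List.range 1 = [0] := rfl
    simp [this, List.find?_cons, h0]
  | m + 2 =>
    have hsplit : List.range (m + 2) = List.range 2 ++ (List.range m).map (2 + ·) := by
      rw [Nat.add_comm m 2, List.range_add]
    rw [hsplit, List.find?_append]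
    have hr2 : List.range 2 = [0, 1] := rfl
    have h2 : (List.range 2).find? p = none := by
      simp [hr2, List.find?_cons, h0, h1]
    rw [h2, List.find?_map]
    have hm : (m + 2) - 2 = m := by omega
    rw [hm]
    have hpe : ((fun j => p (j + 2))) = (p ∘ (2 + ·)) := by
      funext j; simp [Nat.add_comm]
    rw [hpe]
    rcases hf : (List.range m).find? (p ∘ (2 + ·)) with _ | j <;> simp [Nat.add_comm]

-- find? = some at the first witness
lemma find?_range_some {p : Nat → Bool} {n m : Nat} (hm : m < n) (hp : p m = true)
    (hlt : ∀ k < m, p k = false) : (List.range n).find? p = some m := by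
  obtain ⟨d, rfl⟩ : ∃ d, n = m + d := ⟨n - m, by omega⟩
  rw [List.range_add, List.find?_append]
  have h1 : (List.range m).find? p = none := by
    rw [List.find?_eq_none]
    intro x hx
    simp [hlt x (List.mem_range.mp hx)]
  rw [h1]
  obtain ⟨j, rfl⟩ : ∃ j, d = j + 1 := ⟨d - 1, by omega⟩
  rw [List.range_succ_eq_map]
  simp [List.find?_cons, hp]

lemma find?_range_none {p : Nat → Bool} {n : Nat} (h : ∀ k < n, p k = false) :
    (List.range n).find? p = none := by
  rw [List.find?_eq_none]
  intro x hx
  simp [h x (List.mem_range.mp hx)]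

-- THE SCAN INVARIANT: A mid-segment, having processed prefix u (no balanced cut inside u),
-- equals the chunk decomposition of the rest of the segment.
lemma scanA (v : List Char) : ∀ (u : List Char) (a : Int) (x : Char),
    (∀ j, 1 ≤ j → j ≤ u.length → 2 * (u.take j).count x ≠ j) →
    loopA a (u.count x : Int) ((u.length : Int) - (u.count x : Int)) x v
      = a + segTail x (u ++ v) := by
  induction v with
  | nil =>
    intro u a x hno
    rw [List.append_nil]
    have hfc : fc x u = none := by
      apply find?_range_none
      intro k hk
      simp only [fcP, decide_eq_false_iff_not]
      rintro ⟨h2, heq⟩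
      exact hno k (by omega) (by omega) heq
    simp [loopA, segTail, hfc]
  | cons c v' ih =>
    intro u a x hno
    have hcount_c : (u ++ [c]).count x = u.count x + if c = x then 1 else 0 := by
      by_cases hc : c = x <;> simp [List.count_append, hc]
    -- no cut at or below u.length in u ++ (c :: v')
    have hnolow : ∀ (r : List Char) k, k ≤ u.length → fcP x (u ++ r) k = false := by
      intro r k hk
      simp only [fcP, decide_eq_false_iff_not]
      rintro ⟨h2, heq⟩
      rw [List.take_append_of_le_length hk] at heq
      exact hno k (by omega) hk heq
    cases v' with
    | nil =>
      -- one char left: A's loop does not run on it; no cut fits strictly inside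
      have hfc : fc x (u ++ [c]) = none := by
        apply find?_range_none
        intro k hk
        simp only [List.length_append, List.length_singleton] at hk
        exact hnolow [c] k (by omega)
      simp [loopA, segTail, hfc]
    | cons c' w =>
      have htake : (u ++ c :: c' :: w).take (u.length + 1) = u ++ [c] := by
        rw [show (u ++ c :: c' :: w) = (u ++ [c]) ++ (c' :: w) by simp,
            List.take_append_of_le_length (by simp),
            List.take_of_length_le (by simp)]
      -- A processes c; decide the cut at length u.length + 1
      by_cases hcut : 2 * (u ++ [c]).count x = u.length + 1
      · -- cut: A restarts a fresh segment at c'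
        have hulen : 1 ≤ u.length := by
          rcases Nat.eq_zero_or_pos u.length with h0 | h1
          · exfalso
            rw [List.eq_nil_of_length_eq_zero h0] at hcut
            simp [List.count_singleton] at hcut
            split at hcut <;> omega
          · exact h1
        have hfc : fc x (u ++ c :: c' :: w) = some (u.length + 1) := by
          apply find?_range_some
          · simp only [List.length_append, List.length_cons]
            omega
          · simp only [fcP, decide_eq_true_eq, htake]
            exact ⟨by omega, hcut⟩
          · intro k hk
            exact hnolow (c :: c' :: w) k (by omega)
        have hdrop : (u ++ c :: c' :: w).drop (u.length + 1) = c' :: w := by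
          rw [show (u ++ c :: c' :: w) = (u ++ [c]) ++ (c' :: w) by simp,
              List.drop_append_of_le_length (by simp)]
          simp
        -- A's counter test fires
        have hA : loopA a (u.count x : Int) ((u.length : Int) - (u.count x : Int)) x (c :: c' :: w)
            = loopA (a + 1) 0 0 c' (c' :: w) := by
          by_cases hc : c = x
          · have h1 : (u ++ [c]).count x = u.count x + 1 := by simp [hcount_c, hc]
            rw [h1] at hcut
            simp only [loopA, if_pos hc]
            all_goals rw [if_pos (by push_cast; omega)]
          · have h1 : (u ++ [c]).count x = u.count x := by simp [hcount_c, hc]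
            rw [h1] at hcut
            simp only [loopA, if_neg hc]
            all_goals rw [if_pos (by push_cast; omega)]
        rw [hA]
        have hfresh := ih [] (a + 1) c' (by intro j h1 h2; simp at h2; omega)
        simp only [List.count_nil, List.length_nil, Nat.cast_zero, List.nil_append] at hfresh
        rw [show ((0 : Int) - 0) = 0 by ring] at hfresh
        rw [hfresh, ← chunk_cons]
        simp only [segTail, hfc, hdrop]
        ring
      · -- no cut: extend the processed prefix
        have hno' : ∀ j, 1 ≤ j → j ≤ (u ++ [c]).length → 2 * ((u ++ [c]).take j).count x ≠ j := by
          intro j h1 h2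
          simp only [List.length_append, List.length_singleton] at h2
          rcases Nat.lt_or_ge j (u.length + 1) with hj | hj
          · rw [List.take_append_of_le_length (by omega)]
            exact hno j h1 (by omega)
          · have : j = u.length + 1 := by omega
            subst this
            rw [List.take_of_length_le (by simp)]
            exact hcut
        have hA : loopA a (u.count x : Int) ((u.length : Int) - (u.count x : Int)) x (c :: c' :: w)
            = loopA a ((u ++ [c]).count x : Int) (((u ++ [c]).length : Int) - ((u ++ [c]).count x : Int)) x (c' :: w) := by
          by_cases hc : c = x
          · have h1 : (u ++ [c]).count x = u.count x + 1 := by simp [hcount_c, hc]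
            rw [h1] at hcut ⊢
            simp only [loopA, if_pos hc]
            rw [if_neg (by push_cast; omega)]
            simp only [List.length_append, List.length_singleton]
            congr 1 <;> (push_cast; ring)
          · have h1 : (u ++ [c]).count x = u.count x := by simp [hcount_c, hc]
            rw [h1] at hcut ⊢
            simp only [loopA, if_neg hc]
            rw [if_neg (by push_cast; omega)]
            simp only [List.length_append, List.length_singleton]
            congr 1 <;> (push_cast; ring)
        rw [hA, ih (u ++ [c]) a x hno']
        simp

-- ===== A-side bridge: the foldl over pyRange equals loopA on the suffix =====
lemma bridgeA (l : List Char) : ∀ (m k : Nat) (a c1 c2 : Int) (x : Char), l.length - k = m →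
    ((PySem.List.pyRange (k : Int) ((l.length : Int) - 1) 1).foldl (stepA l) (a, c1, c2, x)).1 + 1
      = loopA a c1 c2 x (l.drop k) := by
  intro m
  induction m with
  | zero =>
      intro k a c1 c2 x hm
      have hk : l.length ≤ k := by omega
      rw [PySem.List.pyRange_one_eq_nil (by omega : ((l.length : Int) - 1) ≤ (k : Int))]
      rw [List.drop_eq_nil_of_le hk]
      simp [loopA]
  | succ m ih =>
      intro k a c1 c2 x hm
      have hk : k < l.length := by omega
      by_cases hlast : k + 1 = l.length
      · rw [PySem.List.pyRange_one_eq_nil (by omega : ((l.length : Int) - 1) ≤ (k : Int))]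
        rw [List.drop_eq_getElem_cons hk, List.drop_eq_nil_of_le (by omega)]
        simp [loopA]
      · have hk1 : k + 1 < l.length := by omega
        rw [PySem.List.pyRange_one_cons (by omega : (k : Int) < (l.length : Int) - 1)]
        rw [List.foldl_cons]
        have hdrop : l.drop k = l[k] :: l[k + 1] :: l.drop (k + 2) := by
          rw [List.drop_eq_getElem_cons hk, List.drop_eq_getElem_cons hk1]
        have hget : PySem.List.pyGetD l (k : Int) ' ' = l[k] :=
          PySem.List.pyGetD_ofNat l k ' ' hk
        have hget1 : PySem.List.pyGetD l ((k : Int) + 1) ' ' = l[k + 1] := by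
          rw [show ((k : Int) + 1) = ((k + 1 : Nat) : Int) by push_cast; ring]
          exact PySem.List.pyGetD_ofNat l (k + 1) ' ' hk1
        rw [hdrop]
        simp only [stepA, hget, hget1, loopA]
        have hcast : ((k : Int) + 1) = ((k + 1 : Nat) : Int) := by push_cast; ring
        by_cases hc : l[k] = x
        · by_cases heq : c1 + 1 = c2
          · simp only [if_pos hc]; simp only [if_pos heq]
            rw [hcast, ← List.drop_eq_getElem_cons hk1]
            exact ih (k + 1) (a + 1) 0 0 l[k + 1] (by omega)
          · simp only [if_pos hc]; simp only [if_neg heq]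
            rw [hcast, ← List.drop_eq_getElem_cons hk1]
            exact ih (k + 1) a (c1 + 1) c2 x (by omega)
        · by_cases heq : c1 = c2 + 1
          · simp only [if_neg hc]; simp only [if_pos heq]
            rw [hcast, ← List.drop_eq_getElem_cons hk1]
            exact ih (k + 1) (a + 1) 0 0 l[k + 1] (by omega)
          · simp only [if_neg hc]; simp only [if_neg heq]
            rw [hcast, ← List.drop_eq_getElem_cons hk1]
            exact ih (k + 1) a c1 (c2 + 1) x (by omega)

-- ===== B-side bridge: findCutB matches fc on the dropped suffix =====
lemma find?_congr' {p q : Nat → Bool} : ∀ (l : List Nat), (∀ a ∈ l, p a = q a) → l.find? p = l.find? q := by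
  intro l
  induction l with
  | nil => intro _; rfl
  | cons a t ih =>
    intro h
    rw [List.find?_cons, List.find?_cons, h a (by simp)]
    split
    · rfl
    · exact ih (fun b hb => h b (by simp [hb]))

lemma findCutB_eq (l : List Char) (i : Nat) (hi : i < l.length) :
    findCutB l (i : Int) = (fc (l[i]) (l.drop i)).map (fun c => (i : Int) + c) := by
  have hx : PySem.List.pyGetD l (i : Int) ' ' = l[i] := PySem.List.pyGetD_ofNat l i ' ' hi
  have hlen : (l.drop i).length = l.length - i := by simp
  unfold findCutB
  rw [hx]
  rw [PySem.List.pyRange_one]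
  rw [show (((l.length : Int) - ((i : Int) + 2)).toNat) = l.length - i - 2 by omega]
  rw [List.find?_map]
  unfold fc
  rw [hlen, find?_range_shift2 (p := fcP (l[i]) (l.drop i)) (l.length - i) (by simp [fcP]) (by simp [fcP])]
  rw [find?_congr' (List.range (l.length - i - 2)) (q := fun j => fcP (l[i]) (l.drop i) (j + 2)) ?_]
  · rcases hfq : (List.range (l.length - i - 2)).find? (fun j => fcP (l[i]) (l.drop i) (j + 2)) with _ | j
    · simp
    · simp
      push_cast
      ring
  · intro j _
    simp only [Function.comp_apply]
    have hc : ((i : Int) + 2) + (j : Int) = ((i + (j + 2) : Nat) : Int) := by push_cast; ring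
    have hslice : PySem.List.slice l (some (i : Int)) (some (((i : Int) + 2) + (j : Int))) = (l.drop i).take (j + 2) := by
      rw [hc, PySem.List.slice_natCast]
      congr 1
      omega
    rw [hslice]
    simp only [fcP]
    rw [Bool.eq_iff_iff, beq_iff_eq, decide_eq_true_eq]
    constructor
    · intro h; exact ⟨by omega, by omega⟩
    · intro h; omega

-- the fuel recursion of B's while-loop equals the chunk decomposition of the suffix
lemma bridgeB (l : List Char) : ∀ (fuel i : Nat) (answer : Int), i < l.length → l.length - i ≤ fuel →
    loopB l fuel answer (i : Int) = answer + chunk (l.drop i) - 1 := by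
  intro fuel
  induction fuel with
  | zero => intro i answer hi hf; exfalso; omega
  | succ fuel ih =>
    intro i answer hi hf
    have hdropc : l.drop i = l[i] :: l.drop (i + 1) := List.drop_eq_getElem_cons hi
    rw [loopB, findCutB_eq l i hi]
    rcases hfc : fc (l[i]) (l.drop i) with _ | c
    · -- no cut: one final segment
      have hch : chunk (l.drop i) = 1 := by
        rw [hdropc, chunk_cons, segTail, ← hdropc, hfc]
      simp [Option.map, hch]
    · obtain ⟨h2, hclt, _⟩ := fc_some hfc
      have hlt : i + c < l.length := by
        simp only [List.length_drop] at hclt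
        omega
      have hch : chunk (l.drop i) = 1 + chunk (l.drop (i + c)) := by
        rw [hdropc, chunk_cons, segTail, ← hdropc, hfc]
        show 1 + chunk (List.drop c (List.drop i l)) = _
        rw [List.drop_drop]
      simp [hch]
      rw [show (i : Int) + (c : Int) = ((i + c : Nat) : Int) by push_cast; ring]
      rw [ih (i + c) (answer + 1) hlt (by omega)]
      ring

-- ===== VERDICT (by name: the statement is the Claim_ definition above) =====
theorem solution_spec : Claim_equal_solution := by
  intro s _ hpre
  unfold Spec_solution solution solution_alt
  have hne : s.toList ≠ [] := by
    intro h
    exact hpre (by rwa [← String.toList_eq_nil_iff])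
  obtain ⟨x, rest, hl⟩ := List.exists_cons_of_ne_nil hne
  rw [hl]
  have hget : PySem.List.pyGet? (x :: rest) (0 : Int) = some x := by
    simp [PySem.List.pyGet?, PySem.List.pyIdx?]
  simp only [hget]
  -- A side
  have hA := bridgeA (x :: rest) (x :: rest).length 0 0 0 0 x (by omega)
  simp only [Nat.cast_zero, List.drop_zero] at hA
  -- fold A into loopA, then into the chunk decomposition via the scan invariant
  have hscan := scanA (x :: rest) [] 0 x (by intro j h1 h2; simp at h2; omega)
  simp only [List.count_nil, List.length_nil, Nat.cast_zero, List.nil_append] at hscan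
  rw [show ((0 : Int) - 0) = 0 by ring] at hscan
  -- B side
  have hB := bridgeB (x :: rest) (x :: rest).length 0 1 (by simp) (by omega)
  simp only [Nat.cast_zero, List.drop_zero] at hB
  rw [hA, hscan, ← chunk_cons, hB]
  ring
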